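-- pv_equiv track=rewrite | github.com/miliar/Code_Jam_Webscraper | solutions_python/Problem_181/1604.py | get_winning_string
-- ===== SOURCE A (Python) =====
-- from collections import deque
--
-- def get_winning_string(contest_string):
--     contest_string = list(contest_string)
--     contest_string.reverse()
--     first_word = deque(contest_string.pop())
--     for num_words in range(len(contest_string)):
--         curr_letter = contest_string.pop()
--         if curr_letter >= first_word[0]:
--             first_word.appendleft(curr_letter)
--         else:
--             first_word.append(curr_letter)
--
--     return ''.join(first_word)
-- ===== SOURCE B (Python) =====
-- def get_winning_string(contest_string):
--     # Offline two-stage algorithm: a position goes to the front exactly when its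
--     # character is >= the maximum of everything before it (the deque's head in A
--     # is always the prefix maximum).  Stage 1 tabulates prefix maxima; stage 2
--     # partitions the characters against that table with two comprehensions.
--     first = contest_string[0]
--     rest = contest_string[1:]
--     prefix_max = []
--     m = first
--     for c in rest:
--         prefix_max.append(m)
--         m = max(m, c)
--     front = [c for c, b in zip(rest, prefix_max) if c >= b]
--     back = [c for c, b in zip(rest, prefix_max) if c < b]
--     return ''.join(reversed(front)) + first + ''.join(back)
-- ===== Notes on version B (the rewrite author's own statement) =====
-- stated objective: alternative
-- what changed: Replaces A's online deque simulation (prepend/append each char against the deque's current head) with an offline two-stage algorithm: first tabulate the prefix maxima of the string, then partition the remaining characters against that table with two comprehensions and assemble reversed-front + first + back once; correct because the deque's head after any prefix is exactly that prefix's maximum character.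
import Mathlib
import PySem

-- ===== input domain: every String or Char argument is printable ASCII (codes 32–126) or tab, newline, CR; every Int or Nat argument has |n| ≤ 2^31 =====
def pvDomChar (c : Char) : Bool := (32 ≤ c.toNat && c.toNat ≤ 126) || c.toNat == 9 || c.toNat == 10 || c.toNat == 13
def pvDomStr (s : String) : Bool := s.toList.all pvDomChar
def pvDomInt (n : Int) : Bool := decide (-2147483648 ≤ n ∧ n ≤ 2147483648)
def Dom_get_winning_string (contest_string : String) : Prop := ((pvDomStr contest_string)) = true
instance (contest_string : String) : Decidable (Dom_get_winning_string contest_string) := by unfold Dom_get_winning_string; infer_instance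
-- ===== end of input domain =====

-- B replaces A's online deque simulation with an offline two-stage algorithm:
-- tabulate prefix maxima, then partition the characters against that table
-- (objective: alternative; same asymptotic cost).

-- ===== PORT A =====
-- aLoop: A's for-loop; the deque as a List Char (appendleft = cons, append = ++ [c]),
-- consuming the popped characters in original order.
def aLoop : List Char → List Char → List Char
  | dq, [] => dq
  | dq, c :: rest =>
    match dq with
    | [] => aLoop [c] rest  -- unreachable: the deque is seeded nonempty
    | f :: _ => if f ≤ c then aLoop (c :: dq) rest else aLoop (dq ++ [c]) rest

def get_winning_string (contest_string : String) : String :=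
  match contest_string.toList with
  | [] => ""  -- Python raises IndexError here; excluded by Pre_
  | c :: rest => String.ofList (aLoop [c] rest)

-- ===== PORT B =====
-- bPm: B's first loop, building the prefix-maximum table (state = (prefix_max, m)).
def bPm : List Char × Char → List Char → List Char × Char
  | (pm, m), [] => (pm, m)
  | (pm, m), c :: rest => bPm (pm ++ [m], max m c) rest

def get_winning_string_alt (contest_string : String) : String :=
  match contest_string.toList with
  | [] => ""  -- contest_string[0] raises IndexError; excluded by Pre_
  | first :: rest =>
    let pm := (bPm ([], first) rest).1
    let front := ((rest.zip pm).filter (fun p => p.2 ≤ p.1)).map Prod.fst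
    let back := ((rest.zip pm).filter (fun p => p.1 < p.2)).map Prod.fst
    String.ofList (front.reverse ++ first :: back)

-- ===== PRECONDITION & SPEC =====
-- Pre_ excludes only the empty string, on which both Pythons raise IndexError.
def Pre_get_winning_string (contest_string : String) : Prop := contest_string ≠ ""
instance (contest_string : String) : Decidable (Pre_get_winning_string contest_string) := by unfold Pre_get_winning_string; infer_instance
def pvWitness_get_winning_string : String := "cab"
def Spec_get_winning_string (contest_string : String) (out : String) : Prop := out = get_winning_string_alt contest_string
instance (contest_string : String) (out : String) : Decidable (Spec_get_winning_string contest_string out) := by unfold Spec_get_winning_string; infer_instance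

-- ===== CLAIM (what is proved, stated in full; the proofs are below) =====
def Claim_equal_get_winning_string : Prop := ∀ (contest_string : String), Dom_get_winning_string contest_string → Pre_get_winning_string contest_string → Spec_get_winning_string contest_string (get_winning_string contest_string)

-- ===== LEMMAS AND PROOFS =====

-- Cons-style prefix-maximum list, convenient for induction.
def pmC : Char → List Char → List Char
  | _, [] => []
  | m, c :: rest => m :: pmC (max m c) rest

-- bPm's accumulator is a pure prefix of the cons-style table.
theorem bPm_acc (rest : List Char) : ∀ (pm : List Char) (m : Char),
    (bPm (pm, m) rest).1 = pm ++ pmC m rest := by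
  induction rest with
  | nil => intro pm m; simp [bPm, pmC]
  | cons c rest ih =>
    intro pm m
    simp [bPm, pmC, ih, List.append_assoc]

-- Invariant: A's deque, whose head is always the prefix maximum m, equals
-- reversed front-filter ++ current deque ++ back-filter of the remaining input.
theorem aLoop_eq (rest : List Char) : ∀ (m : Char) (tl bp : List Char),
    aLoop ((m :: tl) ++ bp) rest =
      (((rest.zip (pmC m rest)).filter (fun p => p.2 ≤ p.1)).map Prod.fst).reverse
        ++ (m :: tl) ++ bp
        ++ ((rest.zip (pmC m rest)).filter (fun p => p.1 < p.2)).map Prod.fst := by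
  induction rest with
  | nil => intro m tl bp; simp [aLoop, pmC]
  | cons c rest ih =>
    intro m tl bp
    by_cases h : m ≤ c
    · have hmax : max m c = c := max_eq_right h
      simp only [aLoop, List.cons_append, if_pos h, pmC, hmax, List.zip_cons_cons,
        List.filter_cons]
      have hlt : ¬ (c < m) := not_lt.mpr h
      simp only [h, hlt, decide_true, decide_false, if_true]
      have := ih c (m :: tl) bp
      simp only [List.cons_append] at this
      simp [this, List.append_assoc]
    · have hlt : c < m := lt_of_not_ge h
      have hmax : max m c = m := max_eq_left (le_of_lt hlt)
      simp only [aLoop, List.cons_append, if_neg h, pmC, hmax, List.zip_cons_cons,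
        List.filter_cons]
      simp only [h, hlt, decide_true, decide_false, if_true]
      have := ih m tl (bp ++ [c])
      simp only [List.cons_append, List.append_assoc] at this ⊢
      exact this

-- ===== VERDICT (by name: the statement is the Claim_ definition above) =====
theorem get_winning_string_spec : Claim_equal_get_winning_string := by
  intro s _ _
  unfold Spec_get_winning_string get_winning_string get_winning_string_alt
  cases h : s.toList with
  | nil => rfl
  | cons c rest =>
    have := aLoop_eq rest c [] []
    simp only [List.append_nil] at this
    simp [this, bPm_acc]
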